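-- pv_equiv track=rewrite | github.com/castlhoo/Python-CodingTest | Python-CodingTest/2025/March/15_March/Example_2_2.py | solution
-- ===== SOURCE A (Python) =====
-- from collections import defaultdict # 빈도수 카운팅
--
-- def solution(nums):
--     answer = -1 # 빈도수가 1인 숫자가 없을때를 기본값으로 설정
--     nH = defaultdict(int) # value 타입 지정 (키값이 존재하지 않으면 벨류는 0)
--     # nH = Counter(nums) # nums의 빈도수 카운팅하는 함수 (Counter import해야함)
--
--     for x in nums:
--         nH[x] += 1 # 키의 벨류값 1씩 증가
--     for key in nH:
--         if nH[key] == 1: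
--             answer = max(answer, key)
--
--     return answer
-- ===== SOURCE B (Python) =====
-- def solution(nums):
--     s = sorted(nums)
--     answer = -1
--     i, n = 0, len(s)
--     while i < n:
--         j = i + 1
--         while j < n and s[j] == s[i]:
--             j += 1
--         if j - i == 1:
--             answer = max(answer, s[i])
--         i = j
--     return answer
-- ===== Notes on version B (the rewrite author's own statement) =====
-- stated objective: alternative
-- what changed: Replaces the defaultdict frequency table and key scan with sort-a-copy followed by a single run-grouping scan that takes the max over runs of length exactly one.
import Mathlib
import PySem

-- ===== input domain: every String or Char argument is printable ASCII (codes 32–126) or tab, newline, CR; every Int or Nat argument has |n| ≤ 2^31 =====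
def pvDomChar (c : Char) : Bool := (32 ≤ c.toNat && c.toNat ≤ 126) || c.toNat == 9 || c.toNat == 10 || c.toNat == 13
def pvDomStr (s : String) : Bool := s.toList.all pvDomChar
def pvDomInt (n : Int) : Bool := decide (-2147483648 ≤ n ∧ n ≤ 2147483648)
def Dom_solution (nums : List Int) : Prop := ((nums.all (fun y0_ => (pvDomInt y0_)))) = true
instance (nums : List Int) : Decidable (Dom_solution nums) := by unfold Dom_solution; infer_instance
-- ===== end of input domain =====

-- B: sorts a copy of the input and takes the max over runs of length exactly one, instead of
-- A's defaultdict frequency table scanned over its keys; alternative algorithm, same results.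

-- ===== PORT A =====
def solution (nums : List Int) : Int :=
  let nH := nums.foldl (fun d x => d.insert x (d.getD x 0 + 1)) (PySem.Dict.empty : PySem.Dict Int Int)
  nH.keys.foldl (fun answer key => if nH.getD key 0 = 1 then max answer key else answer) (-1)

-- ===== PORT B =====
-- the outer while loop of Source B: consume one run (x and the following equal elements) per step
def runLoop : List Int → Int → Int
  | [], answer => answer
  | x :: rest, answer =>
      runLoop (rest.dropWhile (fun y => y == x))
        (if (rest.takeWhile (fun y => y == x)).length = 0 then max answer x else answer)
termination_by l _ => l.length
decreasing_by
  simpa using Nat.lt_succ_of_le (List.length_dropWhile_le _ _)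

def solution_alt (nums : List Int) : Int :=
  runLoop (PySem.List.sorted nums (fun x => x) false) (-1)

-- ===== PRECONDITION & SPEC =====
def Spec_solution (nums : List Int) (out : Int) : Prop := out = solution_alt nums
instance (nums : List Int) (out : Int) : Decidable (Spec_solution nums out) := by unfold Spec_solution; infer_instance

-- ===== CLAIM (what is proved, stated in full; the proofs are below) =====
def Claim_equal_solution : Prop := ∀ (nums : List Int), Dom_solution nums → Spec_solution nums (solution nums)

-- ===== LEMMAS AND PROOFS =====

-- the max-accumulating step over a fixed count predicate
def maxStep (cnt : Int → Nat) (a k : Int) : Int := if cnt k = 1 then max a k else a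

lemma maxStep_rcomm (cnt : Int → Nat) (a k1 k2 : Int) :
    maxStep cnt (maxStep cnt a k1) k2 = maxStep cnt (maxStep cnt a k2) k1 := by
  unfold maxStep; split_ifs <;> simp [max_comm, max_left_comm]

-- A computes foldl of maxStep over the first-occurrence dedup of nums
lemma solution_eq_foldl (nums : List Int) :
    solution nums = (PySem.List.dedup nums).foldl (maxStep nums.count) (-1) := by
  unfold solution
  rw [PySem.Dict.foldl_insert_getD_add_one_eq_counter]
  dsimp only
  rw [PySem.Dict.keys_counter]
  rw [← PySem.List.dedup_eq_ofList]
  apply PySem.List.foldl_congr_mem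
  intro a k _
  rw [PySem.Dict.getD_counter]
  unfold maxStep
  by_cases h : nums.count k = 1 <;> simp [h]

-- B on a sorted list computes foldl of maxStep over some nodup enumeration of its members
lemma runLoop_char (l : List Int) (hs : l.Pairwise (· ≤ ·)) :
    ∃ D : List Int, D.Nodup ∧ (∀ k, k ∈ D ↔ k ∈ l) ∧
      ∀ a, runLoop l a = D.foldl (maxStep l.count) a := by
  induction hn : l.length using Nat.strong_induction_on generalizing l with
  | _ n IH =>
    match l, hs with
    | [], _ => exact ⟨[], by simp, by simp, fun a => by simp [runLoop]⟩
    | x :: rest, .cons hx hrest =>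
      set run := rest.takeWhile (fun y => y == x) with hrun
      set tail := rest.dropWhile (fun y => y == x) with htail
      have hrunx : ∀ y ∈ run, y = x := fun y hy => by
        have := List.mem_takeWhile_imp hy; simpa [beq_iff_eq] using this
      have htsub : tail.Sublist rest := List.dropWhile_sublist _
      have htp : tail.Pairwise (· ≤ ·) := hrest.sublist htsub
      have hxt : ∀ y ∈ tail, x < y := by
        cases he : tail with
        | nil => intro y hy; cases hy
        | cons h t =>
          have hde : List.dropWhile (fun y => y == x) rest = h :: t := by rw [← htail, he]
          have hhne : ¬ (h = x) := by
            have hw : List.dropWhile (fun y => y == x) rest ≠ [] := by rw [hde]; simp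
            have := List.head_dropWhile_not (fun y => y == x) hw
            simp only [hde, List.head_cons] at this
            simpa using this
          have hsub2 : (h :: t).Sublist rest := he ▸ htsub
          have hxh : x < h := lt_of_le_of_ne (hx h (hsub2.subset List.mem_cons_self)) (Ne.symm hhne)
          intro y hy
          rcases List.mem_cons.mp hy with rfl | hyt
          · exact hxh
          · exact lt_of_lt_of_le hxh ((List.pairwise_cons.mp (he ▸ htp)).1 y hyt)
      have hxnot : x ∉ tail := fun h => lt_irrefl x (hxt x h)
      have hsplit : run ++ tail = rest := List.takeWhile_append_dropWhile
      have hcx : (x :: rest).count x = run.length + 1 := by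
        rw [List.count_cons_self, ← hsplit, List.count_append]
        have h1 : run.count x = run.length := List.count_eq_length.mpr (fun b hb => (hrunx b hb).symm)
        have h2 : tail.count x = 0 := List.count_eq_zero.mpr hxnot
        omega
      have hct : ∀ k ∈ tail, (x :: rest).count k = tail.count k := by
        intro k hk
        have hkx : k ≠ x := fun h => lt_irrefl x (h ▸ hxt k hk)
        rw [List.count_cons_of_ne hkx.symm, ← hsplit, List.count_append]
        have : run.count k = 0 := List.count_eq_zero.mpr (fun h => hkx (hrunx k h))
        omega
      have hlen : tail.length < n := by
        have := List.Sublist.length_le htsub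
        simp only [← hn, List.length_cons]; omega
      obtain ⟨D', hnd', hmem', hfold'⟩ := IH tail.length hlen tail htp rfl
      refine ⟨x :: D', ?_, ?_, ?_⟩
      · exact List.nodup_cons.mpr ⟨fun h => hxnot ((hmem' x).mp h), hnd'⟩
      · intro k
        simp only [List.mem_cons, hmem' k]
        constructor
        · rintro (rfl | hk)
          · exact Or.inl rfl
          · exact Or.inr (htsub.subset hk)
        · rintro (rfl | hk)
          · exact Or.inl rfl
          · rcases List.mem_append.mp (hsplit ▸ hk) with h | h
            · exact Or.inl (hrunx k h)
            · exact Or.inr h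
      · intro a
        show runLoop (x :: rest) a = List.foldl (maxStep (x :: rest).count) (maxStep (x :: rest).count a x) D'
        rw [runLoop, hfold' _]
        have hstep : (if run.length = 0 then max a x else a) = maxStep (x :: rest).count a x := by
          unfold maxStep; simp only [hcx]
          by_cases h : run.length = 0 <;> simp [h]
        rw [hstep]
        exact PySem.List.foldl_congr_mem D' _ _ _
          (fun acc k hk => by unfold maxStep; simp only [hct k ((hmem' k).mp hk)])

lemma final (nums : List Int) : solution nums = solution_alt nums := by
  rw [solution_eq_foldl]
  unfold solution_alt
  obtain ⟨D, hnd, hmem, hfold⟩ := runLoop_char (PySem.List.sorted nums (fun x => x) false)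
    (PySem.List.sorted_pairwise nums (fun x => x))
  rw [hfold]
  have hcnt : (PySem.List.sorted nums (fun x => x) false).count = nums.count := by
    funext a
    exact (PySem.List.sorted_perm nums (fun x => x) false).count_eq a
  rw [hcnt]
  have hperm : (PySem.List.dedup nums).Perm D := by
    rw [List.perm_ext_iff_of_nodup (by rw [PySem.List.dedup_eq_ofList]; exact PySem.Set.nodup_ofList nums) hnd]
    intro k
    rw [PySem.List.dedup_eq_ofList, PySem.Set.mem_ofList, hmem k, PySem.List.mem_sorted]
  exact @List.Perm.foldl_eq _ _ _ _ _ ⟨maxStep_rcomm nums.count⟩ hperm (-1)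

-- ===== VERDICT (by name: the statement is the Claim_ definition above) =====
theorem solution_spec : Claim_equal_solution := by
  intro nums _
  exact final nums
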